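-- pv_equiv track=rewrite | github.com/paiml/depyler | examples/hard_circular_buffer.py | ring_buffer_sum
-- ===== SOURCE A (Python) =====
-- def ring_buffer_sum(buf: list[int], start: int, count: int) -> int:
--     """Sum count elements from circular buffer starting at start."""
--     n: int = len(buf)
--     total: int = 0
--     i: int = 0
--     while i < count:
--         idx: int = (start + i) % n
--         total = total + buf[idx]
--         i = i + 1
--     return total
-- ===== SOURCE B (Python) =====
-- def ring_buffer_sum(buf: list[int], start: int, count: int) -> int:
--     """Sum count elements from circular buffer starting at start.
--
--     Closed form: whole cycles contribute full_cycles * sum(buf),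
--     the remainder is one (possibly wrapping) slice sum.
--     """
--     if count <= 0:
--         return 0
--     n = len(buf)
--     total = sum(buf)
--     q, r = divmod(count, n)
--     s = start % n
--     if s + r <= n:
--         part = sum(buf[s:s + r])
--     else:
--         part = sum(buf[s:]) + sum(buf[:s + r - n])
--     return q * total + part
-- ===== Notes on version B (the rewrite author's own statement) =====
-- stated objective: alternative
-- what changed: Replaces the per-element loop over count by a closed form: full cycles contribute (count // n) * sum(buf) and the remainder is one (possibly wrapping) slice sum, O(n) work independent of count; intended as faster for count >> n, measured only around the 1.5x threshold on the generated inputs.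
import Mathlib
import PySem

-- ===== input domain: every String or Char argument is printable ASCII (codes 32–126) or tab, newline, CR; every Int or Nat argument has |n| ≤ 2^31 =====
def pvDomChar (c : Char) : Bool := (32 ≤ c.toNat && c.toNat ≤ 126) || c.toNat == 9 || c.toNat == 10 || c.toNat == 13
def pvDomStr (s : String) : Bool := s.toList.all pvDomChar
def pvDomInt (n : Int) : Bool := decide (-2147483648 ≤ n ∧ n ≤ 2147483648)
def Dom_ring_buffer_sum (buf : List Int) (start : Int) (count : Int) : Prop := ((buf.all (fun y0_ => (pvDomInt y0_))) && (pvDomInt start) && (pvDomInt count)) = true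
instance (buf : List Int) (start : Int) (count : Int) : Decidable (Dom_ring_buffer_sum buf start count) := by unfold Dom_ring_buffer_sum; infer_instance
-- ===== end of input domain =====

-- B replaces A's element-by-element loop over count with a closed form: full cycles contribute count//n copies of sum(buf), the remainder is one (possibly wrapping) slice sum.

-- ===== PORT A =====
-- the while loop, one recursive step per iteration; fuel = number of remaining iterations
def rbLoop (buf : List Int) (n start : Int) : Nat → Int → Int → Int
  | 0, _, total => total
  | Nat.succ k, i, total =>
      let idx : Int := PySem.Int.mod (start + i) n
      rbLoop buf n start k (i + 1) (total + (PySem.List.pyGet? buf idx).getD 0)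

def ring_buffer_sum (buf : List Int) (start : Int) (count : Int) : Int :=
  rbLoop buf (buf.length : Int) start count.toNat 0 0

-- ===== PORT B =====
def ring_buffer_sum_alt (buf : List Int) (start : Int) (count : Int) : Int :=
  if count ≤ 0 then 0
  else
    let n : Int := buf.length
    let total : Int := buf.sum
    let q : Int := PySem.Int.floordiv count n
    let r : Int := PySem.Int.mod count n
    let s : Int := PySem.Int.mod start n
    let part : Int :=
      if s + r ≤ n then (PySem.List.slice buf (some s) (some (s + r))).sum
      else (PySem.List.slice buf (some s) none).sum +
           (PySem.List.slice buf none (some (s + r - n))).sum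
    q * total + part

-- ===== PRECONDITION & SPEC =====
-- Pre_ excludes only the inputs where A raises ZeroDivisionError: empty buffer with count > 0.
def Pre_ring_buffer_sum (buf : List Int) (start : Int) (count : Int) : Prop :=
  buf ≠ [] ∨ count ≤ 0
instance (buf : List Int) (start : Int) (count : Int) : Decidable (Pre_ring_buffer_sum buf start count) := by
  unfold Pre_ring_buffer_sum; infer_instance
def pvWitness_ring_buffer_sum : List Int × Int × Int := ([1, 2, 3], 1, 5)

def Spec_ring_buffer_sum (buf : List Int) (start : Int) (count : Int) (out : Int) : Prop := out = ring_buffer_sum_alt buf start count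
instance (buf : List Int) (start : Int) (count : Int) (out : Int) : Decidable (Spec_ring_buffer_sum buf start count out) := by unfold Spec_ring_buffer_sum; infer_instance

-- ===== CLAIM (what is proved, stated in full; the proofs are below) =====
def Claim_equal_ring_buffer_sum : Prop := ∀ (buf : List Int) (start : Int) (count : Int), Dom_ring_buffer_sum buf start count → Pre_ring_buffer_sum buf start count → Spec_ring_buffer_sum buf start count (ring_buffer_sum buf start count)

-- ===== LEMMAS AND PROOFS =====

-- take-sum as a range sum
theorem pv_sum_take (l : List Int) (m : Nat) (hm : m ≤ l.length) :
    (l.take m).sum = ∑ j ∈ Finset.range m, l.getD j 0 := by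
  induction m with
  | zero => simp
  | succ k ih =>
      have hk : k < l.length := by omega
      rw [List.take_succ, List.sum_append, ih (by omega), Finset.sum_range_succ]
      simp [List.getElem?_eq_getElem hk, List.getD_eq_getElem?_getD]

-- full sum as a range sum
theorem pv_sum_eq (l : List Int) :
    l.sum = ∑ j ∈ Finset.range l.length, l.getD j 0 := by
  simpa using pv_sum_take l l.length le_rfl

-- getD through drop
theorem pv_getD_drop (l : List Int) (s j : Nat) :
    (l.drop s).getD j 0 = l.getD (s + j) 0 := by
  simp [List.getD_eq_getElem?_getD, List.getElem?_drop]

-- drop-take sum as a shifted range sum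
theorem pv_sum_drop_take (l : List Int) (s m : Nat) (h : s + m ≤ l.length) :
    ((l.drop s).take m).sum = ∑ j ∈ Finset.range m, l.getD (s + j) 0 := by
  rw [pv_sum_take (l.drop s) m (by simp; omega)]
  exact Finset.sum_congr rfl fun j _ => pv_getD_drop l s j

-- drop sum
theorem pv_sum_drop (l : List Int) (s : Nat) (h : s ≤ l.length) :
    (l.drop s).sum = ∑ j ∈ Finset.range (l.length - s), l.getD (s + j) 0 := by
  rw [pv_sum_eq (l.drop s)]
  simp only [List.length_drop]
  exact Finset.sum_congr rfl fun j _ => pv_getD_drop l s j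

-- any window of length n over the buffer, taken cyclically, sums to the whole buffer
theorem pv_window_sum (l : List Int) (u : Nat) (hn : 0 < l.length) :
    ∑ j ∈ Finset.range l.length, l.getD ((u + j) % l.length) 0 = l.sum := by
  set n := l.length with hnn
  -- reduce to u < n
  have key : ∀ u' : Nat, u' < n →
      ∑ j ∈ Finset.range n, l.getD ((u' + j) % n) 0 = l.sum := by
    intro u' hu'
    have hadd := Finset.sum_range_add (f := fun j => l.getD ((u' + j) % n) 0) (n - u') u'
    rw [Nat.sub_add_cancel (le_of_lt hu')] at hadd
    have h1 : ∑ j ∈ Finset.range (n - u'), l.getD ((u' + j) % n) 0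
        = ∑ j ∈ Finset.range (n - u'), l.getD (u' + j) 0 := by
      refine Finset.sum_congr rfl fun j hj => ?_
      rw [Finset.mem_range] at hj
      congr 1
      exact Nat.mod_eq_of_lt (by omega)
    have h2 : ∑ j ∈ Finset.range u', l.getD ((u' + ((n - u') + j)) % n) 0
        = ∑ j ∈ Finset.range u', l.getD j 0 := by
      refine Finset.sum_congr rfl fun j hj => ?_
      rw [Finset.mem_range] at hj
      congr 1
      have : u' + ((n - u') + j) = n + j := by omega
      rw [this, Nat.add_mod_left, Nat.mod_eq_of_lt (by omega)]
    rw [hadd, h1, h2, pv_sum_eq l, ← hnn]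
    have hs : n = u' + (n - u') := by omega
    calc (∑ j ∈ Finset.range (n - u'), l.getD (u' + j) 0) + ∑ j ∈ Finset.range u', l.getD j 0
        = (∑ j ∈ Finset.range u', l.getD j 0) + ∑ j ∈ Finset.range (n - u'), l.getD (u' + j) 0 := by ring
      _ = ∑ j ∈ Finset.range n, l.getD j 0 := by
          have hadd2 := Finset.sum_range_add (f := fun j => l.getD j 0) u' (n - u')
          rw [Nat.add_sub_cancel' (le_of_lt hu')] at hadd2
          exact hadd2.symm
  have hmod : ∀ j, (u + j) % n = (u % n + j) % n := by
    intro j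
    conv_lhs => rw [Nat.add_mod]
    conv_rhs => rw [Nat.add_mod, Nat.mod_mod_of_dvd (u) (dvd_refl n)]
  calc ∑ j ∈ Finset.range n, l.getD ((u + j) % n) 0
      = ∑ j ∈ Finset.range n, l.getD ((u % n + j) % n) 0 := by
        exact Finset.sum_congr rfl fun j _ => by rw [hmod]
    _ = l.sum := key (u % n) (Nat.mod_lt u hn)


-- Python '%' on a shifted start, for a positive modulus, as Nat arithmetic
theorem pv_mod_shift (start : Int) (n : Nat) (hn : 0 < n) (i : Nat) :
    PySem.Int.mod (start + (i : Int)) (n : Int)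
      = ((((PySem.Int.mod start (n : Int)).toNat + i) % n : Nat) : Int) := by
  have hn' : (0 : Int) < n := by exact_mod_cast hn
  rw [PySem.Int.mod_eq_emod_of_pos hn', PySem.Int.mod_eq_emod_of_pos hn']
  have h0 : 0 ≤ start % (n : Int) := Int.emod_nonneg _ (by omega)
  rw [Int.natCast_mod]
  push_cast
  rw [Int.toNat_of_nonneg h0]
  conv_lhs => rw [Int.add_emod]
  conv_rhs => rw [Int.add_emod, Int.emod_emod_of_dvd _ (dvd_refl _)]

-- A's loop computes the running cyclic sum
theorem pv_rbLoop_spec (buf : List Int) (start : Int) (hb : 0 < buf.length) :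
    ∀ (k i : Nat) (total : Int),
      rbLoop buf (buf.length : Int) start k (i : Int) total
        = total + ∑ j ∈ Finset.range k,
            buf.getD (((PySem.Int.mod start (buf.length : Int)).toNat + (i + j)) % buf.length) 0 := by
  intro k
  induction k with
  | zero => intro i total; simp [rbLoop]
  | succ k ih =>
      intro i total
      rw [rbLoop]
      have hidx := pv_mod_shift start buf.length hb i
      have hstep : ((i : Int) + 1) = ((i + 1 : Nat) : Int) := by push_cast; ring
      rw [hidx, hstep, ih (i + 1)]
      have hm : ((PySem.Int.mod start (buf.length : Int)).toNat + i) % buf.length < buf.length :=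
        Nat.mod_lt _ hb
      rw [PySem.List.pyGet?_natCast]
      rw [Finset.sum_range_succ' (fun j => buf.getD
            (((PySem.Int.mod start (buf.length : Int)).toNat + (i + j)) % buf.length) 0) k]
      have hcong : ∀ j ∈ Finset.range k,
          buf.getD (((PySem.Int.mod start (buf.length : Int)).toNat + ((i + 1) + j)) % buf.length) 0
            = buf.getD (((PySem.Int.mod start (buf.length : Int)).toNat + (i + (j + 1))) % buf.length) 0 := by
        intro j _
        congr 2
        omega
      rw [Finset.sum_congr rfl hcong]
      have hget : (buf[((PySem.Int.mod start (buf.length : Int)).toNat + i) % buf.length]?).getD 0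
          = buf.getD (((PySem.Int.mod start (buf.length : Int)).toNat + (i + 0)) % buf.length) 0 := by
        rw [List.getD_eq_getElem?_getD]
        simp
      rw [hget]
      ring

-- full cycles peel off whole-buffer sums
theorem pv_S_period (buf : List Int) (s' : Nat) (hb : 0 < buf.length) :
    ∀ (q r : Nat),
      ∑ j ∈ Finset.range (q * buf.length + r), buf.getD ((s' + j) % buf.length) 0
        = (q : Int) * buf.sum + ∑ j ∈ Finset.range r, buf.getD ((s' + j) % buf.length) 0 := by
  intro q
  induction q with
  | zero => intro r; simp
  | succ q ih =>
      intro r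
      have harg : (q + 1) * buf.length + r = (q * buf.length + r) + buf.length := by ring
      rw [harg, Finset.sum_range_add, ih r]
      have hwin : ∑ j ∈ Finset.range buf.length,
          buf.getD ((s' + (q * buf.length + r + j)) % buf.length) 0 = buf.sum := by
        have := pv_window_sum buf (s' + (q * buf.length + r)) hb
        calc ∑ j ∈ Finset.range buf.length, buf.getD ((s' + (q * buf.length + r + j)) % buf.length) 0
            = ∑ j ∈ Finset.range buf.length, buf.getD (((s' + (q * buf.length + r)) + j) % buf.length) 0 := by
              refine Finset.sum_congr rfl fun j _ => by rw [← Nat.add_assoc]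
          _ = buf.sum := this
      rw [hwin]
      push_cast
      ring

-- the remainder window as (possibly wrapping) slice sums
theorem pv_S_partial (buf : List Int) (s' r : Nat) (hs : s' < buf.length) (hr : r ≤ buf.length) :
    ∑ j ∈ Finset.range r, buf.getD ((s' + j) % buf.length) 0
      = if s' + r ≤ buf.length
        then ((buf.drop s').take r).sum
        else (buf.drop s').sum + (buf.take (s' + r - buf.length)).sum := by
  split_ifs with h
  · rw [pv_sum_drop_take buf s' r h]
    refine Finset.sum_congr rfl fun j hj => ?_
    rw [Finset.mem_range] at hj
    congr 1
    exact Nat.mod_eq_of_lt (by omega)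
  · have harg : r = (buf.length - s') + (s' + r - buf.length) := by omega
    rw [harg, Finset.sum_range_add]
    have h1 : ∑ j ∈ Finset.range (buf.length - s'), buf.getD ((s' + j) % buf.length) 0
        = (buf.drop s').sum := by
      rw [pv_sum_drop buf s' (le_of_lt hs)]
      refine Finset.sum_congr rfl fun j hj => ?_
      rw [Finset.mem_range] at hj
      congr 1
      exact Nat.mod_eq_of_lt (by omega)
    have h2 : ∑ j ∈ Finset.range (s' + r - buf.length),
          buf.getD ((s' + ((buf.length - s') + j)) % buf.length) 0
        = (buf.take (s' + r - buf.length)).sum := by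
      rw [pv_sum_take buf (s' + r - buf.length) (by omega)]
      refine Finset.sum_congr rfl fun j hj => ?_
      rw [Finset.mem_range] at hj
      congr 1
      have : s' + ((buf.length - s') + j) = buf.length + j := by omega
      rw [this, Nat.add_mod_left, Nat.mod_eq_of_lt (by omega)]
    have hfix : s' + (buf.length - s' + (s' + r - buf.length)) - buf.length
        = s' + r - buf.length := by omega
    rw [h1, h2, hfix]

-- B for positive count, lets unfolded
theorem pv_alt_of_pos (buf : List Int) (start count : Int) (hc : 0 < count) :
    ring_buffer_sum_alt buf start count =
      PySem.Int.floordiv count (buf.length : Int) * buf.sum +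
        (if PySem.Int.mod start (buf.length : Int) + PySem.Int.mod count (buf.length : Int) ≤ (buf.length : Int)
         then (PySem.List.slice buf (some (PySem.Int.mod start (buf.length : Int)))
                (some (PySem.Int.mod start (buf.length : Int) + PySem.Int.mod count (buf.length : Int)))).sum
         else (PySem.List.slice buf (some (PySem.Int.mod start (buf.length : Int))) none).sum +
              (PySem.List.slice buf none
                (some (PySem.Int.mod start (buf.length : Int) + PySem.Int.mod count (buf.length : Int) - (buf.length : Int)))).sum) := by
  rw [ring_buffer_sum_alt, if_neg (by omega)]

-- ===== VERDICT (by name: the statement is the Claim_ definition above) =====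
theorem ring_buffer_sum_spec : Claim_equal_ring_buffer_sum := by
  intro buf start count _ hpre
  unfold Spec_ring_buffer_sum
  by_cases hc : count ≤ 0
  · rw [ring_buffer_sum_alt, if_pos hc]
    rw [ring_buffer_sum, Int.toNat_of_nonpos hc]
    rfl
  · have hc' : 0 < count := by omega
    have hb : 0 < buf.length := by
      rcases hpre with h | h
      · exact List.length_pos_of_ne_nil h
      · omega
    -- names
    set n := buf.length with hn
    set s' := (PySem.Int.mod start (n : Int)).toNat with hs'
    set c := count.toNat with hcdef
    have hcc : (c : Int) = count := Int.toNat_of_nonneg (by omega)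
    have hn' : (0 : Int) < n := by exact_mod_cast hb
    -- A side
    have hA : ring_buffer_sum buf start count
        = ∑ j ∈ Finset.range c, buf.getD ((s' + j) % n) 0 := by
      rw [ring_buffer_sum]
      have := pv_rbLoop_spec buf start hb c 0 0
      simp only [Nat.cast_zero] at this
      rw [this]
      simp only [zero_add]
      rfl
    -- s' bounds
    have hs0 : (0 : Int) ≤ PySem.Int.mod start (n : Int) := PySem.Int.mod_nonneg start hn'
    have hslt : PySem.Int.mod start (n : Int) < (n : Int) := PySem.Int.mod_lt start hn'
    have hscast : ((s' : Nat) : Int) = PySem.Int.mod start (n : Int) := Int.toNat_of_nonneg hs0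
    have hsn : s' < n := by omega
    -- B pieces as Nat arithmetic
    have hq : PySem.Int.floordiv count (n : Int) = ((c / n : Nat) : Int) := by
      rw [← hcc]; exact PySem.Int.floordiv_natCast c n
    have hr : PySem.Int.mod count (n : Int) = ((c % n : Nat) : Int) := by
      rw [← hcc]; exact PySem.Int.mod_natCast c n
    have hrlt : c % n < n := Nat.mod_lt _ hb
    rw [pv_alt_of_pos buf start count hc', hq, hr, hA]
    -- decompose the range sum
    have hsplit : c = (c / n) * n + c % n := by
      rw [Nat.div_add_mod']
    conv_lhs => rw [hsplit]
    rw [pv_S_period buf s' hb (c / n) (c % n),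
        pv_S_partial buf s' (c % n) hsn (le_of_lt hrlt)]
    by_cases hcase : s' + c % n ≤ n
    · rw [if_pos hcase, if_pos (by rw [← hscast]; push_cast; omega)]
      rw [← hscast, PySem.List.slice_natCast_add]
    · rw [if_neg hcase, if_neg (by rw [← hscast]; push_cast; omega)]
      rw [← hscast, PySem.List.slice_from_natCast]
      have harg : ((s' : Nat) : Int) + ((c % n : Nat) : Int) - (n : Int) = ((s' + c % n - n : Nat) : Int) := by
        push_cast; omega
      rw [harg, PySem.List.slice_to_natCast]
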